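-- pv_equiv track=rewrite | github.com/DineshMitta/PythonCodes | max_span_model1.py | largest_span
-- ===== SOURCE A (Python) =====
-- def largest_span(arr, n):
--     first_occurrence = {}
--     max_span = 0
--
--     for i in range(n):
--         # If the value is not in the dictionary, store its first occurrence
--         if arr[i] not in first_occurrence:
--             first_occurrence[arr[i]] = i
--         # Calculate the span and update the maximum span
--         span = i - first_occurrence[arr[i]] + 1
--         max_span = max(max_span, span)
--
--     return max_span
-- ===== SOURCE B (Python) =====
-- def largest_span(arr, n):
--     pairs = sorted((arr[i], i) for i in range(n))
--     best = 0
--     start = 0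
--     prev = None
--     for v, i in pairs:
--         if prev is None or v != prev:
--             start = i
--         prev = v
--         best = max(best, i - start + 1)
--     return best
-- ===== Notes on version B (the rewrite author's own statement) =====
-- stated objective: alternative
-- what changed: A makes one indexed pass keeping a dict of first occurrences and updating a running maximum per index; B instead sorts the (value, index) pairs and scans the sorted list once, detecting runs of equal values and taking the best (last index - run start index + 1) per run.
import Mathlib
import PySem

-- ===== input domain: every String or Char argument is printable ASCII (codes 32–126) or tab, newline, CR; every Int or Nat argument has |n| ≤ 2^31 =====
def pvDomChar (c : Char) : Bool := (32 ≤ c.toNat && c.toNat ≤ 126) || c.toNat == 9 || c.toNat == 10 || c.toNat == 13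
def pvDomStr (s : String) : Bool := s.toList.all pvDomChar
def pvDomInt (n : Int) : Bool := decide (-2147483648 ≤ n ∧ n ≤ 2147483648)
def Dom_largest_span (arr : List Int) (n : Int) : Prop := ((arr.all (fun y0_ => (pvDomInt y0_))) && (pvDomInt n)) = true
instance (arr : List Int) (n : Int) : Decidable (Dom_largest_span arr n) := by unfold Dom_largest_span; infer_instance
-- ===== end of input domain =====

-- B replaces A's dict-of-first-occurrences indexed pass by sorting the (value, index)
-- pairs and scanning the sorted list once, run by run (objective: alternative algorithm).

-- ===== PORT A =====
-- step of A's loop body: state = (first_occurrence, max_span)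
def lsAStep (arr : List Int) (st : PySem.Dict Int Int × Int) (i : Int) : PySem.Dict Int Int × Int :=
  let v := PySem.List.pyGetD arr i 0   -- arr[i]; Pre_ guarantees the index is in range
  let d := if st.1.contains v then st.1 else st.1.insert v i
  (d, max st.2 (i - d.getD v 0 + 1))

def largest_span (arr : List Int) (n : Int) : Int :=
  ((PySem.List.pyRange 0 n 1).foldl (lsAStep arr) (PySem.Dict.empty, 0)).2

-- ===== PORT B =====
-- pairs = sorted((arr[i], i) for i in range(n)); Python sorts the tuples lexicographically
def lsPairs (arr : List Int) (n : Int) : List (Int × Int) :=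
  PySem.List.sorted2 ((PySem.List.pyRange 0 n 1).map (fun i => (PySem.List.pyGetD arr i 0, i)))
    Prod.fst Prod.snd

-- loop body of B's scan: state = (best, start, prev)
def lsScanStep (st : Int × Int × Option Int) (p : Int × Int) : Int × Int × Option Int :=
  let start := if st.2.2 = none ∨ st.2.2 ≠ some p.1 then p.2 else st.2.1
  (max st.1 (p.2 - start + 1), start, some p.1)

def largest_span_alt (arr : List Int) (n : Int) : Int :=
  ((lsPairs arr n).foldl lsScanStep (0, 0, none)).1

-- ===== PRECONDITION & SPEC =====
-- Pre_ excludes exactly the inputs where Python A raises IndexError (arr[i] with n > len(arr)).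
def Pre_largest_span (arr : List Int) (n : Int) : Prop := n ≤ (arr.length : Int)
instance (arr : List Int) (n : Int) : Decidable (Pre_largest_span arr n) := by
  unfold Pre_largest_span; infer_instance
def pvWitness_largest_span : List Int × Int := ([1, 2, 1, 2], 4)

def Spec_largest_span (arr : List Int) (n : Int) (out : Int) : Prop := out = largest_span_alt arr n
instance (arr : List Int) (n : Int) (out : Int) : Decidable (Spec_largest_span arr n out) := by
  unfold Spec_largest_span; infer_instance

-- ===== CLAIM (what is proved, stated in full; the proofs are below) =====
def Claim_equal_largest_span : Prop := ∀ (arr : List Int) (n : Int), Dom_largest_span arr n → Pre_largest_span arr n → Spec_largest_span arr n (largest_span arr n)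

-- ===== LEMMAS AND PROOFS =====

-- arr[j] for a natural index, and the first occurrence (within range m) of a value
def lsVal (arr : List Int) (j : Nat) : Int := PySem.List.pyGetD arr (j : Int) 0

def lsFo (arr : List Int) (m : Nat) (v : Int) : Nat :=
  if h : ∃ k, k < m ∧ lsVal arr k = v then Nat.find h else 0

-- the span contribution of one (value, index) pair
def lsG (arr : List Int) (m : Nat) (p : Int × Int) : Int := p.2 - (lsFo arr m p.1 : Int) + 1

lemma lsFo_min (arr : List Int) (m : Nat) {j : Nat} (hj : j < m) {v : Int}
    (hv : lsVal arr j = v) : lsFo arr m v ≤ j := by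
  unfold lsFo
  rw [dif_pos ⟨j, hj, hv⟩]
  exact Nat.find_min' _ ⟨hj, hv⟩

lemma lsFo_spec (arr : List Int) (m : Nat) {v : Int} (h : ∃ k, k < m ∧ lsVal arr k = v) :
    lsFo arr m v < m ∧ lsVal arr (lsFo arr m v) = v := by
  unfold lsFo
  rw [dif_pos h]
  exact Nat.find_spec h

-- the strict lexicographic order on (value, index) pairs
def lsLexR (p q : Int × Int) : Prop := p.1 < q.1 ∨ (p.1 = q.1 ∧ p.2 < q.2)

lemma lsLexR_trans {p q r : Int × Int} (h1 : lsLexR p q) (h2 : lsLexR q r) : lsLexR p r := by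
  unfold lsLexR at *; omega

lemma lsLexR_total {p q : Int × Int} (hne : p ≠ q) : lsLexR p q ∨ lsLexR q p := by
  unfold lsLexR
  by_cases h1 : p.1 = q.1
  · have h2 : p.2 ≠ q.2 := fun h => hne (Prod.ext h1 h)
    omega
  · omega

-- the Bool comparator sorted2 uses for key (fst, snd)
def lsBef (a b : Int × Int) : Bool :=
  decide (a.1 < b.1) || (!decide (b.1 < a.1) && decide (a.2 < b.2))

lemma lsBef_iff (p q : Int × Int) : lsBef p q = true ↔ lsLexR p q := by
  unfold lsBef lsLexR
  simp
  omega

-- inserting a fresh element into a lexicographically sorted list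
lemma insertBy_lex (x : Int × Int) (acc : List (Int × Int)) (hs : acc.Pairwise lsLexR)
    (hx : x ∉ acc) :
    (PySem.List.insertBy lsBef x acc).Pairwise lsLexR ∧
    (PySem.List.insertBy lsBef x acc).Perm (x :: acc) := by
  induction acc with
  | nil => exact ⟨List.pairwise_singleton _ _, List.Perm.refl _⟩
  | cons y ys ih =>
    rcases List.pairwise_cons.mp hs with ⟨hy, hys⟩
    by_cases hb : lsBef x y = true
    · have hxy : lsLexR x y := (lsBef_iff x y).mp hb
      have heq : PySem.List.insertBy lsBef x (y :: ys) = x :: y :: ys := by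
        simp [PySem.List.insertBy, hb]
      rw [heq]
      refine ⟨List.pairwise_cons.mpr ⟨?_, hs⟩, List.Perm.refl _⟩
      intro w hw
      rcases List.mem_cons.mp hw with h | h
      · exact h ▸ hxy
      · exact lsLexR_trans hxy (hy w h)
    · have hxny : x ≠ y := fun h => hx (h ▸ List.mem_cons_self)
      have hyx : lsLexR y x := by
        rcases lsLexR_total hxny with h | h
        · exact absurd ((lsBef_iff x y).mpr h) hb
        · exact h
      have hxys : x ∉ ys := fun h => hx (List.mem_cons_of_mem _ h)
      obtain ⟨ihp, ihperm⟩ := ih hys hxys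
      have heq : PySem.List.insertBy lsBef x (y :: ys) = y :: PySem.List.insertBy lsBef x ys := by
        simp [PySem.List.insertBy, hb]
      rw [heq]
      refine ⟨List.pairwise_cons.mpr ⟨?_, ihp⟩, ?_⟩
      · intro w hw
        rcases List.mem_cons.mp (ihperm.mem_iff.mp hw) with h | h
        · exact h ▸ hyx
        · exact hy w h
      · exact (ihperm.cons y).trans (List.Perm.swap x y ys)

-- the insertion-sort fold produces a lexicographically sorted permutation
lemma foldl_insertBy_lex : ∀ (xs acc : List (Int × Int)), acc.Pairwise lsLexR →
    (xs ++ acc).Nodup →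
    (xs.foldl (fun acc x => PySem.List.insertBy lsBef x acc) acc).Pairwise lsLexR ∧
    (xs.foldl (fun acc x => PySem.List.insertBy lsBef x acc) acc).Perm (acc ++ xs) := by
  intro xs
  induction xs with
  | nil =>
    intro acc hs _
    exact ⟨hs, by simp⟩
  | cons x t ih =>
    intro acc hs hnd
    rw [List.cons_append, List.nodup_cons] at hnd
    obtain ⟨hxn, hnd0⟩ := hnd
    have hx : x ∉ acc := fun h => hxn (List.mem_append.mpr (Or.inr h))
    obtain ⟨hp, hperm⟩ := insertBy_lex x acc hs hx
    have hpermc : (t ++ PySem.List.insertBy lsBef x acc).Perm (x :: (t ++ acc)) :=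
      (List.Perm.append_left t hperm).trans List.perm_middle
    have hnd' : (t ++ PySem.List.insertBy lsBef x acc).Nodup :=
      hpermc.nodup_iff.mpr (List.nodup_cons.mpr ⟨hxn, hnd0⟩)
    obtain ⟨hp2, hperm2⟩ := ih (PySem.List.insertBy lsBef x acc) hp hnd'
    refine ⟨hp2, ?_⟩
    show (t.foldl _ (PySem.List.insertBy lsBef x acc)).Perm (acc ++ x :: t)
    refine hperm2.trans ?_
    refine (List.Perm.append_right t hperm).trans ?_
    exact List.perm_middle.symm

-- sorted2 with keys (fst, snd) IS the insertBy fold with the lexicographic comparator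
lemma lsPairs_sorted2_eq (arr : List Int) (n : Int) :
    lsPairs arr n =
      ((PySem.List.pyRange 0 n 1).map (fun i => (PySem.List.pyGetD arr i 0, i))).foldl
        (fun acc x => PySem.List.insertBy lsBef x acc) [] := rfl

lemma lsPairs_pairwise (arr : List Int) (n : Int) : (lsPairs arr n).Pairwise lsLexR := by
  rw [lsPairs_sorted2_eq]
  refine (foldl_insertBy_lex _ [] (by simp) ?_).1
  rw [List.append_nil]
  refine List.Nodup.map ?_ ?_
  · intro a b hab
    exact congrArg Prod.snd hab
  · rw [PySem.List.pyRange_one]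
    exact (List.nodup_range).map (fun a b h => by omega)

lemma lsPairs_perm (arr : List Int) (n : Int) :
    (lsPairs arr n).Perm ((PySem.List.pyRange 0 n 1).map (fun i => (PySem.List.pyGetD arr i 0, i))) :=
  PySem.List.sorted2_perm _ _ _ _

-- folding max is invariant under permutation
lemma foldl_max_perm {l₁ l₂ : List Int} (h : l₁.Perm l₂) (a : Int) :
    l₁.foldl max a = l₂.foldl max a := by
  induction h generalizing a with
  | nil => rfl
  | cons x _ ih => simp only [List.foldl_cons]; exact ih _
  | swap x y l =>
    simp only [List.foldl_cons]
    rw [max_right_comm]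
  | trans _ _ ih1 ih2 => exact (ih1 a).trans (ih2 a)

-- B's run scan over a sorted list computes the running max of the span contributions
lemma lsScan_go (arr : List Int) (m : Nat) :
    ∀ (L : List (Int × Int)) (best start : Int) (prev : Option Int),
    L.Pairwise lsLexR →
    (∀ p ∈ L, ∃ j : Nat, j < m ∧ p = (lsVal arr j, (j : Int))) →
    (∀ p ∈ L, prev = some p.1 → start = (lsFo arr m p.1 : Int)) →
    (∀ p ∈ L, (p.1, (lsFo arr m p.1 : Int)) ∈ L ∨ prev = some p.1) →
    (∀ p ∈ L, ∀ w, prev = some w → w ≤ p.1) →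
    (L.foldl lsScanStep (best, start, prev)).1 = (L.map (lsG arr m)).foldl max best := by
  intro L
  induction L with
  | nil => intro best start prev _ _ _ _ _; rfl
  | cons p T ih =>
    intro best start prev hpw h2 h3 h4 h6
    rcases List.pairwise_cons.mp hpw with ⟨hpT, hpwT⟩
    obtain ⟨j, hj, hpj⟩ := h2 p List.mem_cons_self
    have hp1 : p.1 = lsVal arr j := by rw [hpj]
    have hp2 : p.2 = (j : Int) := by rw [hpj]
    have hvle : (lsFo arr m p.1 : Int) ≤ p.2 := by
      rw [hp1, hp2]
      exact_mod_cast lsFo_min arr m hj rfl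
    have h2' : ∀ q ∈ T, ∃ j : Nat, j < m ∧ q = (lsVal arr j, (j : Int)) :=
      fun q hq => h2 q (List.mem_cons_of_mem _ hq)
    by_cases hprev : prev = some p.1
    · -- continuing a run: start already points at the first occurrence
      have hstart : start = (lsFo arr m p.1 : Int) := h3 p List.mem_cons_self hprev
      have hstep : lsScanStep (best, start, prev) p =
          (max best (p.2 - start + 1), start, some p.1) := by
        simp only [lsScanStep]
        rw [if_neg (by simp [hprev])]
      have h3' : ∀ q ∈ T, some p.1 = some q.1 → start = (lsFo arr m q.1 : Int) := by
        intro q hq hq1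
        have h : p.1 = q.1 := by injection hq1
        rw [← h]
        exact hstart
      have h4' : ∀ q ∈ T, (q.1, (lsFo arr m q.1 : Int)) ∈ T ∨ some p.1 = some q.1 := by
        intro q hq
        rcases h4 q (List.mem_cons_of_mem _ hq) with h | h
        · rcases List.mem_cons.mp h with h' | h'
          · have hq1 := congrArg Prod.fst h'
            simp only at hq1
            right
            rw [hq1]
          · exact Or.inl h'
        · right
          rw [hprev] at h
          exact h
      have h6' : ∀ q ∈ T, ∀ w, some p.1 = some w → w ≤ q.1 := by
        intro q hq w hw
        have hwp : p.1 = w := by injection hw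
        have hlt := hpT q hq
        unfold lsLexR at hlt
        omega
      have hg : p.2 - start + 1 = lsG arr m p := by
        unfold lsG
        rw [hstart]
      simp only [List.foldl_cons, List.map_cons]
      rw [hstep, hg]
      exact ih (max best (lsG arr m p)) start (some p.1) hpwT h2' h3' h4' h6'
    · -- a new run starts: p is the first occurrence of its value
      have hfo : (p.1, (lsFo arr m p.1 : Int)) ∈ p :: T := by
        rcases h4 p List.mem_cons_self with h | h
        · exact h
        · exact absurd h hprev
      have hpfo : p.2 = (lsFo arr m p.1 : Int) := by
        rcases List.mem_cons.mp hfo with h | h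
        · have h2 := congrArg Prod.snd h
          simp only at h2
          exact h2.symm
        · have hlex := hpT _ h
          unfold lsLexR at hlex
          simp only [] at hlex
          omega
      have hstep : lsScanStep (best, start, prev) p =
          (max best (p.2 - p.2 + 1), p.2, some p.1) := by
        simp only [lsScanStep]
        rw [if_pos (Or.inr hprev)]
      have h3' : ∀ q ∈ T, some p.1 = some q.1 → p.2 = (lsFo arr m q.1 : Int) := by
        intro q hq hq1
        have h : p.1 = q.1 := by injection hq1
        rw [← h]
        exact hpfo
      have h4' : ∀ q ∈ T, (q.1, (lsFo arr m q.1 : Int)) ∈ T ∨ some p.1 = some q.1 := by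
        intro q hq
        rcases h4 q (List.mem_cons_of_mem _ hq) with h | h
        · rcases List.mem_cons.mp h with h' | h'
          · have hq1 := congrArg Prod.fst h'
            simp only at hq1
            right
            rw [hq1]
          · exact Or.inl h'
        · -- prev = some q.1 with q.1 ≠ p.1 is impossible below p in a sorted list
          exfalso
          have hle := h6 p List.mem_cons_self q.1 h
          have hlt := hpT q hq
          unfold lsLexR at hlt
          rcases hlt with h' | ⟨h', _⟩
          · omega
          · exact hprev (by rw [h']; exact h)
      have h6' : ∀ q ∈ T, ∀ w, some p.1 = some w → w ≤ q.1 := by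
        intro q hq w hw
        have hwp : p.1 = w := by injection hw
        have hlt := hpT q hq
        unfold lsLexR at hlt
        omega
      have hg : p.2 - p.2 + 1 = lsG arr m p := by
        unfold lsG
        omega
      simp only [List.foldl_cons, List.map_cons]
      rw [hstep, hg]
      exact ih (max best (lsG arr m p)) p.2 (some p.1) hpwT h2' h3' h4' h6'

-- ===== A-side: the dict of first occurrences and the running max =====
def lsStA (arr : List Int) (k : Nat) : PySem.Dict Int Int × Int :=
  (List.range k).foldl (fun st (j : Nat) => lsAStep arr st (j : Int)) (PySem.Dict.empty, 0)

lemma lsStA_invariant (arr : List Int) (m : Nat) :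
    ∀ k, k ≤ m →
    (∀ v, (lsStA arr k).1.contains v = true ↔ ∃ j, j < k ∧ lsVal arr j = v) ∧
    (∀ j, j < k → (lsStA arr k).1.getD (lsVal arr j) 0 = ((lsFo arr m (lsVal arr j)) : Int)) ∧
    (lsStA arr k).2 =
      ((List.range k).map (fun (j : Nat) => ((j : Int) - (lsFo arr m (lsVal arr j) : Int) + 1))).foldl max 0 := by
  intro k
  induction k with
  | zero =>
    intro _
    refine ⟨?_, ?_, ?_⟩ <;> simp [lsStA, PySem.Dict.contains_empty]
  | succ k ih =>
    intro hk1
    obtain ⟨hi, hii, hiii⟩ := ih (Nat.le_of_succ_le hk1)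
    have hkm : k < m := hk1
    have hstep : lsStA arr (k + 1) = lsAStep arr (lsStA arr k) (k : Int) := by
      simp [lsStA, List.range_succ]
    set d := (lsStA arr k).1 with hd
    set v := lsVal arr k with hv
    have hgetv : PySem.List.pyGetD arr ((k : Nat) : Int) 0 = v := rfl
    by_cases hc : d.contains v = true
    · -- value seen before: dict unchanged, first occurrence already recorded
      obtain ⟨j, hjk, hjv⟩ := (hi v).mp hc
      have hgd : d.getD v 0 = ((lsFo arr m v : Nat) : Int) := by
        have h := hii j hjk
        rw [hjv] at h
        exact h
      have hA : lsStA arr (k + 1) = (d, max (lsStA arr k).2 ((k : Int) - d.getD v 0 + 1)) := by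
        rw [hstep]
        simp only [lsAStep, hgetv, ← hd, hc, if_true]
      refine ⟨?_, ?_, ?_⟩
      · intro w
        rw [hA]
        show d.contains w = true ↔ _
        rw [hi w]
        constructor
        · rintro ⟨j', hj', hw⟩
          exact ⟨j', by omega, hw⟩
        · rintro ⟨j', hj', hw⟩
          rcases Nat.lt_or_ge j' k with h | h
          · exact ⟨j', h, hw⟩
          · have hj'k : j' = k := by omega
            subst hj'k
            refine ⟨j, hjk, ?_⟩
            rw [hjv, hv]
            exact hw
      · intro j' hj'
        rw [hA]
        show d.getD (lsVal arr j') 0 = _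
        rcases Nat.lt_or_ge j' k with h | h
        · exact hii j' h
        · have hj'k : j' = k := by omega
          subst hj'k
          rw [← hv, hgd]
      · rw [hA]
        show max (lsStA arr k).2 _ = _
        rw [hiii, List.range_succ, List.map_append, List.foldl_append]
        simp only [List.map_cons, List.map_nil, List.foldl_cons, List.foldl_nil]
        rw [hgd, ← hv]
    · -- new value: inserted with index k, which is its first occurrence
      have hc' : d.contains v = false := by simpa using hc
      have hnotj : ∀ j, j < k → lsVal arr j ≠ v := by
        intro j hj hjv
        exact hc ((hi v).mpr ⟨j, hj, hjv⟩)
      have hfo : lsFo arr m v = k := by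
        have hex : ∃ k', k' < m ∧ lsVal arr k' = v := ⟨k, hkm, hv.symm⟩
        have hle : lsFo arr m v ≤ k := lsFo_min arr m hkm hv.symm
        obtain ⟨h1, h2⟩ := lsFo_spec arr m hex
        rcases Nat.lt_or_ge (lsFo arr m v) k with h | h
        · exact absurd h2 (hnotj _ h)
        · omega
      have hA : lsStA arr (k + 1) =
          (d.insert v (k : Int), max (lsStA arr k).2 ((k : Int) - (k : Int) + 1)) := by
        rw [hstep]
        simp only [lsAStep, hgetv, ← hd, hc, if_false, Bool.false_eq_true,
          PySem.Dict.getD_insert_self]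
      refine ⟨?_, ?_, ?_⟩
      · intro w
        rw [hA]
        show (d.insert v (k : Int)).contains w = true ↔ _
        rw [PySem.Dict.contains_iff_mem_keys,
          PySem.Dict.keys_insert_of_not_contains d (k : Int) hc',
          List.mem_append, List.mem_singleton, ← PySem.Dict.contains_iff_mem_keys, hi w]
        constructor
        · rintro (⟨j', hj', hw⟩ | hw)
          · exact ⟨j', by omega, hw⟩
          · exact ⟨k, by omega, hv.symm.trans hw.symm⟩
        · rintro ⟨j', hj', hw⟩
          rcases Nat.lt_or_ge j' k with h | h
          · exact Or.inl ⟨j', h, hw⟩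
          · have hj'k : j' = k := by omega
            subst hj'k
            exact Or.inr (hw.symm.trans hv.symm)
      · intro j' hj'
        rw [hA]
        show (d.insert v (k : Int)).getD (lsVal arr j') 0 = _
        rw [PySem.Dict.getD_insert]
        rcases Nat.lt_or_ge j' k with h | h
        · rw [if_neg (hnotj j' h)]
          exact hii j' h
        · have hj'k : j' = k := by omega
          subst hj'k
          rw [← hv, if_pos rfl, hfo]
      · rw [hA]
        show max (lsStA arr k).2 _ = _
        rw [hiii, List.range_succ, List.map_append, List.foldl_append]
        simp only [List.map_cons, List.map_nil, List.foldl_cons, List.foldl_nil]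
        rw [← hv, hfo]

-- ===== VERDICT (by name: the statement is the Claim_ definition above) =====
theorem largest_span_spec : Claim_equal_largest_span := by
  intro arr n _ _
  unfold Spec_largest_span
  set m := (n - 0).toNat with hm
  -- A's value is the running max of (j - first occurrence of arr[j] + 1)
  have hA : largest_span arr n =
      ((List.range m).map (fun (j : Nat) => ((j : Int) - (lsFo arr m (lsVal arr j) : Int) + 1))).foldl max 0 := by
    unfold largest_span
    rw [PySem.List.pyRange_one]
    conv_lhs => rw [List.foldl_map]
    simp only [zero_add, ← hm]
    have h := (lsStA_invariant arr m m (Nat.le_refl m)).2.2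
    unfold lsStA at h
    exact h
  -- the unsorted pair list
  have hP : ((PySem.List.pyRange 0 n 1).map (fun i => (PySem.List.pyGetD arr i 0, i))) =
      (List.range m).map (fun j => (lsVal arr j, (j : Int))) := by
    rw [PySem.List.pyRange_one, List.map_map, ← hm]
    refine List.map_congr_left ?_
    intro j _
    simp [lsVal, Function.comp]
  -- B's value is the running max of the span contributions over the sorted pairs
  have hB : largest_span_alt arr n = ((lsPairs arr n).map (lsG arr m)).foldl max 0 := by
    unfold largest_span_alt
    refine lsScan_go arr m (lsPairs arr n) 0 0 none (lsPairs_pairwise arr n) ?_ ?_ ?_ ?_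
    · intro p hp
      have hmem := (lsPairs_perm arr n).mem_iff.mp hp
      rw [hP] at hmem
      obtain ⟨j, hj, hpj⟩ := List.mem_map.mp hmem
      exact ⟨j, List.mem_range.mp hj, hpj.symm⟩
    · intro p _ h
      cases h
    · intro p hp
      left
      have hmem := (lsPairs_perm arr n).mem_iff.mp hp
      rw [hP] at hmem
      obtain ⟨j, hj, hpj⟩ := List.mem_map.mp hmem
      have hjm : j < m := List.mem_range.mp hj
      have hex : ∃ k', k' < m ∧ lsVal arr k' = p.1 := ⟨j, hjm, by rw [← hpj]⟩
      obtain ⟨h1f, h2f⟩ := lsFo_spec arr m hex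
      refine (lsPairs_perm arr n).mem_iff.mpr ?_
      rw [hP]
      refine List.mem_map.mpr ⟨lsFo arr m p.1, List.mem_range.mpr h1f, ?_⟩
      rw [h2f]
    · intro p _ w hw
      cases hw
  rw [hA, hB]
  refine (foldl_max_perm ?_ 0).symm
  have hmp : ((lsPairs arr n).map (lsG arr m)).Perm
      ((((PySem.List.pyRange 0 n 1).map (fun i => (PySem.List.pyGetD arr i 0, i))).map (lsG arr m))) :=
    (lsPairs_perm arr n).map _
  refine hmp.trans ?_
  rw [hP, List.map_map]
  refine List.Perm.of_eq ?_
  refine List.map_congr_left ?_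
  intro j _
  simp [lsG, lsVal, Function.comp]
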